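-- pv_equiv track=rewrite | github.com/studio501/commitxml | commit_xml/commit_xml.py | _find_first_last_group
-- ===== SOURCE A (Python) =====
-- def _find_first_last_group(t_arr):
-- 	i_head = 0
-- 	i_tail = 0
-- 	for i,line in enumerate(t_arr):
-- 		if line.find('Group') != -1:
-- 			i_head = i
-- 			break
--
-- 	for i in range(len(t_arr)-1, -1, -1):
-- 		if t_arr[i].find('Group') != -1:
-- 			i_tail = i
-- 			break
--
-- 	return [i_head,i_tail]
-- ===== SOURCE B (Python) =====
-- def _find_first_last_group(t_arr):
-- 	i_head = 0
-- 	i_tail = 0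
-- 	seen = False
-- 	for i, line in enumerate(t_arr):
-- 		if 'Group' in line:
-- 			if not seen:
-- 				i_head = i
-- 				seen = True
-- 			i_tail = i
-- 	return [i_head, i_tail]
-- ===== Notes on version B (the rewrite author's own statement) =====
-- stated objective: simpler
-- what changed: Replaced A's two scans (a forward loop with break plus a backward indexed loop with break) by one forward pass that maintains first- and last-match indices with a seen flag.
import Mathlib
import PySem

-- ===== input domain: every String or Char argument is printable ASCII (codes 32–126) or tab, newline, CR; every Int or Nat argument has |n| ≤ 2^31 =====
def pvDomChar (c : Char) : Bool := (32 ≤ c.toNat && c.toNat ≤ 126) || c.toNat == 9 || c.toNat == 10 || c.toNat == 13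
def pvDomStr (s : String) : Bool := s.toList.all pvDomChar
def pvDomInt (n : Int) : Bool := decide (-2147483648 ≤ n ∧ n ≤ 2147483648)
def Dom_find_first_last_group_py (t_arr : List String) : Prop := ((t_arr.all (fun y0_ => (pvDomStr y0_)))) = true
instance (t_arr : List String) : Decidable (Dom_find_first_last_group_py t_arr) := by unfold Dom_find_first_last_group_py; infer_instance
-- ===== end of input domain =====

-- B replaces A's two scans (forward break-loop + backward indexed break-loop) by one
-- forward pass maintaining first/last match indices with a seen flag: simpler decomposition.

-- ===== PORT A =====
-- first loop of A: over enumerate(t_arr), break on the first line containing 'Group', else i_head stays 0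
def pvAHead : List (Int × String) → Int
  | [] => 0
  | (i, line) :: rest => if PySem.Str.find line "Group" ≠ -1 then i else pvAHead rest

-- second loop of A: over range(len(t_arr)-1, -1, -1), break on the first (i.e. last) match, else i_tail stays 0
-- (the indices produced by range are always in bounds, so the `none` branch of pyGet? is unreachable)
def pvATail (t_arr : List String) : List Int → Int
  | [] => 0
  | i :: rest =>
    match PySem.List.pyGet? t_arr i with
    | some s => if PySem.Str.find s "Group" ≠ -1 then i else pvATail t_arr rest
    | none => 0

def find_first_last_group_py (t_arr : List String) : List Int :=
  let i_head := pvAHead (PySem.List.enumerate t_arr)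
  let i_tail := pvATail t_arr (PySem.List.pyRange ((t_arr.length : Int) - 1) (-1) (-1))
  [i_head, i_tail]

-- ===== PORT B =====
def find_first_last_group_py_alt (t_arr : List String) : List Int :=
  let st := (PySem.List.enumerate t_arr).foldl
    (fun (st : Int × Int × Bool) p =>
      if PySem.Str.isIn "Group" p.2 then
        ((if st.2.2 then st.1 else p.1), p.1, true)
      else st) (0, 0, false)
  [st.1, st.2.1]

-- ===== PRECONDITION & SPEC =====
def Spec_find_first_last_group_py (t_arr : List String) (out : List Int) : Prop := out = find_first_last_group_py_alt t_arr
instance (t_arr : List String) (out : List Int) : Decidable (Spec_find_first_last_group_py t_arr out) := by unfold Spec_find_first_last_group_py; infer_instance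

-- ===== CLAIM (what is proved, stated in full; the proofs are below) =====
def Claim_equal_find_first_last_group_py : Prop := ∀ (t_arr : List String), Dom_find_first_last_group_py t_arr → Spec_find_first_last_group_py t_arr (find_first_last_group_py t_arr)

-- ===== LEMMAS AND PROOFS =====

-- the match predicate both programs test
def mGrp (s : String) : Bool := PySem.Str.isIn "Group" s

theorem find_iff_mGrp (s : String) : (PySem.Str.find s "Group" ≠ -1) ↔ mGrp s = true := by
  rw [mGrp, PySem.Str.isIn_iff_infix]
  constructor
  · intro h
    by_contra hni
    exact h (by simpa [PySem.Chars.find_eq_neg_one_iff] using hni)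
  · intro h hf
    have := (PySem.Chars.find_eq_neg_one_iff s.toList "Group".toList).mp (by simpa using hf)
    exact this h

-- index of the first match
def fIdx? : List String → Option Nat
  | [] => none
  | a :: l => if mGrp a then some 0 else (fIdx? l).map (· + 1)

-- index of the last match
def lIdx? : List String → Option Nat
  | [] => none
  | a :: l =>
    match lIdx? l with
    | some j => some (j + 1)
    | none => if mGrp a then some 0 else none

theorem fIdx?_none_iff_lIdx?_none (l : List String) : fIdx? l = none ↔ lIdx? l = none := by
  induction l with
  | nil => simp [fIdx?, lIdx?]
  | cons a l ih =>
    simp only [fIdx?, lIdx?]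
    cases h : lIdx? l with
    | none => cases hm : mGrp a <;> simp [ih.mpr h]
    | some j =>
      have hne : fIdx? l ≠ none := fun hf => by simp [ih.mp hf] at h
      cases hm : mGrp a <;> simp [hne]

theorem pvAHead_enum (l : List String) (k : Int) :
    pvAHead (PySem.List.enumerate l k) =
      match fIdx? l with
      | some j => k + (j : Int)
      | none => 0 := by
  induction l generalizing k with
  | nil => simp [pvAHead, PySem.List.enumerate, fIdx?]
  | cons a l ih =>
    simp only [PySem.List.enumerate, pvAHead, fIdx?]
    by_cases hm : mGrp a
    · rw [if_pos ((find_iff_mGrp a).mpr hm), if_pos hm]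
      simp
    · rw [if_neg (fun h => hm ((find_iff_mGrp a).mp h)), if_neg hm, ih]
      cases h : fIdx? l with
      | none => simp
      | some j => simp only [Option.map_some]; push_cast; ring

theorem lIdx?_append_singleton (l : List String) (a : String) :
    lIdx? (l ++ [a]) = if mGrp a then some l.length else lIdx? l := by
  induction l with
  | nil => cases hm : mGrp a <;> simp [lIdx?, hm]
  | cons b l ih =>
    simp only [List.cons_append, lIdx?, ih]
    cases hm : mGrp a
    · simp
    · simp only [List.length_cons]
      cases h : lIdx? l <;> simp

-- pvATail only looks at the listed indices
theorem pvATail_congr (t1 t2 : List String) (idxs : List Int)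
    (h : ∀ i ∈ idxs, PySem.List.pyGet? t1 i = PySem.List.pyGet? t2 i) :
    pvATail t1 idxs = pvATail t2 idxs := by
  induction idxs with
  | nil => rfl
  | cons i rest ih =>
    simp only [pvATail, h i (List.mem_cons_self ..)]
    cases PySem.List.pyGet? t2 i with
    | none => rfl
    | some s =>
      simp only []
      split
      · rfl
      · exact ih (fun j hj => h j (List.mem_cons_of_mem _ hj))

-- the descending index list the range loop scans
def descIdx (n : Nat) : List Int := (List.range n).map (fun k => ((n - 1 - k : Nat) : Int))

theorem descIdx_succ (n : Nat) :
    descIdx (n + 1) = (n : Int) :: descIdx n := by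
  simp only [descIdx, List.range_succ_eq_map, List.map_cons, List.map_map]
  congr 1
  apply List.map_congr_left
  intro k hk
  simp only [Function.comp_apply]
  congr 1
  omega

theorem pyRange_desc (n : Nat) :
    PySem.List.pyRange ((n : Int) - 1) (-1) (-1) = descIdx n := by
  simp only [PySem.List.pyRange, descIdx]
  cases n with
  | zero => norm_num
  | succ m =>
    have h1 : (-1 : Int) < ((m + 1 : Nat) : Int) - 1 := by push_cast; omega
    rw [if_neg (by norm_num : ¬ (-1 : Int) = 0), if_neg (by norm_num : ¬ (0:Int) < -1), if_pos h1]
    have h2 : (((m + 1 : Nat) : Int) - 1 - -1 + - -1 - 1) / - -1 = ((m + 1 : Nat) : Int) := by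
      push_cast; omega
    rw [h2, Int.toNat_natCast]
    apply List.map_congr_left
    intro k hk
    rw [List.mem_range] at hk
    omega

theorem pvATail_desc (l : List String) :
    pvATail l (descIdx l.length) =
      match lIdx? l with
      | some j => (j : Int)
      | none => 0 := by
  induction l using List.reverseRecOn with
  | nil => simp [descIdx, pvATail, lIdx?]
  | append_singleton l a ih =>
    rw [List.length_append, List.length_singleton, descIdx_succ, lIdx?_append_singleton]
    have hget : PySem.List.pyGet? (l ++ [a]) ((l.length : Int)) = some a := by
      rw [PySem.List.pyGet?_natCast]
      simp
    simp only [pvATail, hget]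
    by_cases hm : mGrp a
    · rw [if_pos ((find_iff_mGrp a).mpr hm), if_pos hm]
    · rw [if_neg (fun h => hm ((find_iff_mGrp a).mp h)), if_neg hm,
        pvATail_congr (l ++ [a]) l (descIdx l.length) ?_, ih]
      intro i hi
      simp only [descIdx, List.mem_map, List.mem_range] at hi
      obtain ⟨k, hk, rfl⟩ := hi
      rw [PySem.List.pyGet?_natCast, PySem.List.pyGet?_natCast,
        List.getElem?_append_left (by omega)]

theorem foldB (l : List String) (k : Int) (st : Int × Int × Bool) :
    (PySem.List.enumerate l k).foldl
      (fun (st : Int × Int × Bool) p =>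
        if PySem.Str.isIn "Group" p.2 then
          ((if st.2.2 then st.1 else p.1), p.1, true)
        else st) st =
      match fIdx? l, lIdx? l with
      | some j, some j' => ((if st.2.2 then st.1 else k + (j : Int)), (k + (j' : Int) : Int), true)
      | _, _ => st := by
  induction l generalizing k st with
  | nil => simp [PySem.List.enumerate, fIdx?, lIdx?]
  | cons a l ih =>
    simp only [PySem.List.enumerate, List.foldl_cons, fIdx?, lIdx?]
    by_cases hm : mGrp a
    · have hm' : PySem.Str.isIn "Group" a = true := hm
      rw [if_pos hm, if_pos hm', ih]
      cases hf : fIdx? l with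
      | none =>
        rw [(fIdx?_none_iff_lIdx?_none l).mp hf]
        simp [hm]
      | some j =>
        cases hlx : lIdx? l with
        | none => exfalso; have := (fIdx?_none_iff_lIdx?_none l).mpr hlx; simp [hf] at this
        | some j' =>
          by_cases hs : st.2.2 <;> simp [hs, Prod.ext_iff] <;> omega
    · have hm' : ¬ PySem.Str.isIn "Group" a = true := hm
      rw [if_neg hm, if_neg hm', ih]
      cases hf : fIdx? l with
      | none =>
        rw [(fIdx?_none_iff_lIdx?_none l).mp hf]
        simp [hm]
      | some j =>
        cases hlx : lIdx? l with
        | none => exfalso; have := (fIdx?_none_iff_lIdx?_none l).mpr hlx; simp [hf] at this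
        | some j' =>
          by_cases hs : st.2.2 <;> simp [hs, Prod.ext_iff] <;> omega

-- ===== VERDICT (by name: the statement is the Claim_ definition above) =====
theorem find_first_last_group_py_spec : Claim_equal_find_first_last_group_py := by
  intro t_arr _
  unfold Spec_find_first_last_group_py find_first_last_group_py find_first_last_group_py_alt
  rw [pyRange_desc t_arr.length, pvAHead_enum t_arr 0, pvATail_desc, foldB t_arr 0 (0, 0, false)]
  cases hf : fIdx? t_arr with
  | none =>
    rw [(fIdx?_none_iff_lIdx?_none t_arr).mp hf]
  | some j =>
    cases hlx : lIdx? t_arr with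
    | none => exfalso; have := (fIdx?_none_iff_lIdx?_none t_arr).mpr hlx; simp [hf] at this
    | some j' => simp
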